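-- pv_equiv track=rewrite | github.com/nilin/cancellations | cancellations/examples/examplefunctions.py | He_coefficients
-- ===== SOURCE A (Python) =====
-- def He_coefficients(n):
-- 	if n==0:
-- 		return [[1]]
-- 	if n==1:
-- 		return [[1],[0,1]]
-- 	else:
-- 		A=He_coefficients(n-1)
-- 		a1,a2=A[-1],A[-2]+2*[0]
-- 		a=[-(n-1)*a2[0]]
-- 		for k in range(1,n+1):
-- 			a.append(a1[k-1]-(n-1)*a2[k])
-- 		A.append(a)
-- 		return A
-- ===== SOURCE B (Python) =====
-- def He_coefficients(n):
--     if n == 0: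
--         return [[1]]
--     A = [[1], [0, 1]]
--     for m in range(2, n + 1):
--         a1, a2 = A[-1], A[-2] + 2 * [0]
--         A.append([-(m - 1) * a2[0]] +
--                  [a1[k - 1] - (m - 1) * a2[k] for k in range(1, m + 1)])
--     return A
-- ===== Notes on version B (the rewrite author's own statement) =====
-- stated objective: alternative
-- what changed: Replaced the recursion on n (which unwinds a call stack of depth n) by a bottom-up loop over degrees 2..n that grows the triangle in place, building each row with a comprehension instead of repeated append.
import Mathlib
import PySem

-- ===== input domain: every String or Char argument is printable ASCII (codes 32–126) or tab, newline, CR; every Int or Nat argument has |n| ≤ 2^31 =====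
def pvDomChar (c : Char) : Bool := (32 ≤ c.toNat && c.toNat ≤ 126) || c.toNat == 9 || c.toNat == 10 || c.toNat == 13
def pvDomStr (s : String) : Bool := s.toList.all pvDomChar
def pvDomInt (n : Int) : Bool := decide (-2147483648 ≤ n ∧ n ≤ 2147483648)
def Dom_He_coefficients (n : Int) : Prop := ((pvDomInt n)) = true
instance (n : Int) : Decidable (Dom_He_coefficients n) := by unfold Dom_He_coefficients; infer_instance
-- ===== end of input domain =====

-- B replaces A's recursion on n by a bottom-up loop over degrees 2..n (alternative decomposition, same cost).


-- ===== PORT A =====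
-- Recursion on n, ported as structural recursion on n.toNat (Pre_ keeps n ≥ 0, where this is exact).
-- A[-1], A[-2], a1[k-1], a2[k] always succeed on the values A builds; `.getD` only discharges the Option.
def He_go : Nat → List (List Int)
  | 0 => [[1]]
  | 1 => [[1], [0, 1]]
  | (m+2) =>
      let n : Int := (m : Int) + 2
      let A := He_go (m+1)
      let a1 := (PySem.List.pyGet? A (-1)).getD []
      let a2 := (PySem.List.pyGet? A (-2)).getD [] ++ [0, 0]
      let a := (PySem.List.pyRange 1 (n+1) 1).foldl
        (fun acc k => acc ++ [(PySem.List.pyGet? a1 (k-1)).getD 0 - (n-1) * (PySem.List.pyGet? a2 k).getD 0])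
        [-(n-1) * (PySem.List.pyGet? a2 0).getD 0]
      A ++ [a]

def He_coefficients (n : Int) : List (List Int) := He_go n.toNat

-- ===== PORT B =====
def He_step (A : List (List Int)) (m : Int) : List (List Int) :=
  let a1 := (PySem.List.pyGet? A (-1)).getD []
  let a2 := (PySem.List.pyGet? A (-2)).getD [] ++ [0, 0]
  A ++ [[-(m-1) * (PySem.List.pyGet? a2 0).getD 0] ++
        (PySem.List.pyRange 1 (m+1) 1).map
          (fun k => (PySem.List.pyGet? a1 (k-1)).getD 0 - (m-1) * (PySem.List.pyGet? a2 k).getD 0)]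

def He_coefficients_alt (n : Int) : List (List Int) :=
  if n = 0 then [[1]]
  else (PySem.List.pyRange 2 (n+1) 1).foldl He_step [[1], [0, 1]]

-- ===== PRECONDITION & SPEC =====
-- For n < 0 the Python A recurses without a base case (RecursionError); Pre_ excludes exactly those.
def Pre_He_coefficients (n : Int) : Prop := 0 ≤ n
instance (n : Int) : Decidable (Pre_He_coefficients n) := by unfold Pre_He_coefficients; infer_instance
def pvWitness_He_coefficients : Int := (3)

def Spec_He_coefficients (n : Int) (out : List (List Int)) : Prop := out = He_coefficients_alt n
instance (n : Int) (out : List (List Int)) : Decidable (Spec_He_coefficients n out) := by unfold Spec_He_coefficients; infer_instance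

-- ===== CLAIM (what is proved, stated in full; the proofs are below) =====
def Claim_equal_He_coefficients : Prop := ∀ (n : Int), Dom_He_coefficients n → Pre_He_coefficients n → Spec_He_coefficients n (He_coefficients n)

-- ===== LEMMAS AND PROOFS =====

-- A's append-one-at-a-time row loop equals B's map-based row build.
theorem foldl_push_eq_map (f : Int → Int) (l : List Int) (init : List Int) :
    l.foldl (fun acc k => acc ++ [f k]) init = init ++ l.map f := by
  induction l generalizing init with
  | nil => simp
  | cons x xs ih => simp [List.foldl, ih, List.append_assoc]

theorem He_go_eq_foldl (m : Nat) :
    He_go (m+1) = (PySem.List.pyRange 2 ((m : Int) + 2) 1).foldl He_step [[1], [0, 1]] := by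
  induction m with
  | zero => simp [He_go, PySem.List.pyRange_one_eq_nil]
  | succ k ih =>
      have hr : PySem.List.pyRange 2 ((k : Int) + 1 + 2) 1
          = PySem.List.pyRange 2 ((k : Int) + 2) 1 ++ [(k : Int) + 2] := by
        have := PySem.List.pyRange_one_succ_right (a := 2) (b := (k : Int) + 2) (by omega)
        simpa [add_assoc] using this
      show He_go (k+2) = _
      rw [show ((k + 1 : Nat) : Int) + 2 = (k : Int) + 1 + 2 by push_cast; ring, hr, List.foldl_append, ← ih]
      simp only [He_go, He_step, List.foldl]
      rw [foldl_push_eq_map]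

-- ===== VERDICT (by name: the statement is the Claim_ definition above) =====
theorem He_coefficients_spec : Claim_equal_He_coefficients := by
  intro n _ hpre
  unfold Spec_He_coefficients He_coefficients He_coefficients_alt
  by_cases h0 : n = 0
  · subst h0; simp [He_go]
  · rw [if_neg h0]
    have hn : 1 ≤ n := by unfold Pre_He_coefficients at hpre; omega
    obtain ⟨m, hm⟩ : ∃ m : Nat, n.toNat = m + 1 := ⟨n.toNat - 1, by omega⟩
    rw [hm, He_go_eq_foldl]
    congr 2
    omega
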